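-- pv_equiv track=rewrite | github.com/alcatrazEscapee/AdventOfCode | 2020/utils.py | von_neumann_neighbors
-- ===== SOURCE A (Python) =====
-- import itertools
-- from typing import Any, Callable, Dict, Iterable, Iterator, List, Optional, Sequence, Set, Tuple, Union
--
-- def sum_iter(x: Iterable[int], y: Iterable[int], s: int = 1) -> Tuple[int, ...]:
--     """ Returns the equation x + s * y for each element in the sequence x and y """
--     return tuple(a + s * b for a, b in zip(x, y))
--
-- def manhattan(x: Union[Iterable[int], complex]) -> int:
--     """ Returns the magnitude of a sequence using the 1-norm (manhattan distance to the origin). Also works for complex numbers. """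
--     if isinstance(x, complex):
--         x = map(int, (x.real, x.imag))
--     return sum(map(abs, x))
--
-- def von_neumann_neighbors(p: Tuple[int, ...], d: int = 1) -> Iterable[Tuple[int, ...]]:
--     """ Returns all points in a Von Neumann neighborhood (points which are at most a distance of d away, using the 1 norm / manhattan distance) """
--     n = len(p)
--     if d == 1:  # Special case, just iterate through each unit vector
--         for i in range(n):
--             dp = tuple((1 if j == i else 0 for j in range(n)))
--             yield sum_iter(p, dp)
--             yield sum_iter(p, dp, -1)
--     else:  # Otherwise, compute the moore neighborhood and filter
--         zero = (0,) * len(p)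
--         for dp in itertools.product(range(-d, d + 1), repeat=len(p)):
--             if dp != zero and manhattan(dp) <= d:
--                 yield sum_iter(p, dp)
-- ===== SOURCE B (Python) =====
-- def von_neumann_neighbors(p, d=1):
--     """Same neighborhood, but the general case prunes by remaining budget instead of filtering the full product."""
--     n = len(p)
--     if d == 1:
--         for i in range(n):
--             for s in (1, -1):
--                 yield p[:i] + (p[i] + s,) + p[i + 1:]
--     else:
--         def dfs(q, budget, nonzero):
--             if not q:
--                 return [()] if nonzero else []
--             out = []
--             x, rest = q[0], q[1:]
--             for dx in range(-d, d + 1):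
--                 r = budget - abs(dx)
--                 if r >= 0:
--                     for tail in dfs(rest, r, nonzero or dx != 0):
--                         out.append((x + dx,) + tail)
--             return out
--         yield from dfs(tuple(p), d, False)
-- ===== Notes on version B (the rewrite author's own statement) =====
-- stated objective: faster
-- what changed: Replaces the full (2d+1)^n product-then-filter enumeration with a recursive DFS that carries the remaining Manhattan budget per coordinate and prunes impossible branches (and builds the d==1 fast path by list surgery instead of unit-vector zips), keeping the exact yield order.
import Mathlib
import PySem

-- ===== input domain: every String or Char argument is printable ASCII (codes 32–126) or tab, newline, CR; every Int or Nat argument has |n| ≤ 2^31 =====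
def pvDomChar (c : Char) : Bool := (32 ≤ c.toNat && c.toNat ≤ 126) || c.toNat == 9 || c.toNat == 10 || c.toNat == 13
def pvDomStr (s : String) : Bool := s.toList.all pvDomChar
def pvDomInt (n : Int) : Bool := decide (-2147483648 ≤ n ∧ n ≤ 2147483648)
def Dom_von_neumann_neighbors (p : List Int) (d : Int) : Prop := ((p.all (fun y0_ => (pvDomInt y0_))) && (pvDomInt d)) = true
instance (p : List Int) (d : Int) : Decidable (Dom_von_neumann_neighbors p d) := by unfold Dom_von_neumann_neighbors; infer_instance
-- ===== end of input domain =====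

-- B replaces the full (2d+1)^n product-then-filter by a budget-pruned DFS (and list surgery for d == 1),
-- same output sequence; both sides materialise the generator's yields as a list.

-- ===== PORT A =====
-- sum_iter(x, y, s): tuple(a + s*b for a, b in zip(x, y))
def pvSumIter (x y : List Int) (s : Int) : List Int :=
  (x.zip y).map (fun ab => ab.1 + s * ab.2)

-- manhattan(x): sum(map(abs, x))  (the complex branch is unreachable for tuple input)
def pvManhattan (x : List Int) : Int := (x.map (fun a => |a|)).sum

-- itertools.product(xs, repeat=k), lexicographic (first coordinate slowest)
def pvProduct (xs : List Int) : Nat → List (List Int)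
  | 0 => [[]]
  | k + 1 => xs.flatMap (fun v => (pvProduct xs k).map (fun t => v :: t))

def von_neumann_neighbors (p : List Int) (d : Int) : List (List Int) :=
  let n := p.length
  if d = 1 then
    (List.range n).flatMap (fun i =>
      let dp := (List.range n).map (fun j => if j = i then (1 : Int) else 0)
      [pvSumIter p dp 1, pvSumIter p dp (-1)])
  else
    let zero := List.replicate p.length (0 : Int)
    ((pvProduct (PySem.List.pyRange (-d) (d + 1) 1) p.length).filter
      (fun dp => decide (dp ≠ zero ∧ pvManhattan dp ≤ d))).map
      (fun dp => pvSumIter p dp 1)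

-- ===== PORT B =====
-- dfs(q, budget, nonzero): per-coordinate choice with remaining-budget pruning
def pvDfs (d : Int) : List Int → Int → Bool → List (List Int)
  | [], _, nonzero => if nonzero then [[]] else []
  | x :: rest, budget, nonzero =>
      (PySem.List.pyRange (-d) (d + 1) 1).flatMap (fun dx =>
        let r := budget - |dx|
        if 0 ≤ r then
          (pvDfs d rest r (nonzero || decide (dx ≠ 0))).map (fun t => (x + dx) :: t)
        else [])

def von_neumann_neighbors_alt (p : List Int) (d : Int) : List (List Int) :=
  let n := p.length
  if d = 1 then
    (List.range n).flatMap (fun (i : Nat) =>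
      [(1 : Int), -1].map (fun s =>
        PySem.List.slice p none (some (i : Int)) ++
        [PySem.List.pyGetD p (i : Int) 0 + s] ++
        PySem.List.slice p (some ((i : Int) + 1)) none))
  else pvDfs d p d false

-- ===== PRECONDITION & SPEC =====
def Spec_von_neumann_neighbors (p : List Int) (d : Int) (out : List (List Int)) : Prop := out = von_neumann_neighbors_alt p d
instance (p : List Int) (d : Int) (out : List (List Int)) : Decidable (Spec_von_neumann_neighbors p d out) := by unfold Spec_von_neumann_neighbors; infer_instance

-- ===== CLAIM (what is proved, stated in full; the proofs are below) =====
def Claim_equal_von_neumann_neighbors : Prop := ∀ (p : List Int) (d : Int), Dom_von_neumann_neighbors p d → Spec_von_neumann_neighbors p d (von_neumann_neighbors p d)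

-- ===== LEMMAS AND PROOFS =====

theorem pvManhattan_nonneg (x : List Int) : 0 ≤ pvManhattan x := by
  unfold pvManhattan
  apply List.sum_nonneg
  intro a ha
  simp only [List.mem_map] at ha
  obtain ⟨b, _, rfl⟩ := ha
  exact abs_nonneg b

theorem pvSumIter_zero_right (x : List Int) (s : Int) (n : Nat) (hn : x.length ≤ n) :
    pvSumIter x (List.replicate n (0 : Int)) s = x := by
  induction x generalizing n with
  | nil => simp [pvSumIter]
  | cons a tl ih =>
    cases n with
    | zero => simp at hn
    | succ m =>
      simp only [List.replicate_succ, pvSumIter, List.zip_cons_cons, List.map_cons]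
      rw [List.cons_eq_cons]
      refine ⟨by ring, ?_⟩
      have h : tl.length ≤ m := by simp only [List.length_cons] at hn; omega
      simpa [pvSumIter] using ih m h

theorem pvSumIter_unit (p : List Int) (i : Nat) (s : Int) (hi : i < p.length) :
    pvSumIter p ((List.range p.length).map (fun j => if j = i then (1 : Int) else 0)) s =
      p.take i ++ [p.getD i 0 + s] ++ p.drop (i + 1) := by
  induction p generalizing i with
  | nil => simp at hi
  | cons a tl ih =>
    rw [List.length_cons, List.range_succ_eq_map]
    cases i with
    | zero =>
      simp only [List.map_cons, List.map_map, pvSumIter, List.zip_cons_cons, List.map_cons,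
        List.take_zero, List.getD_cons_zero, List.drop_succ_cons, List.drop_zero,
        List.nil_append, List.singleton_append]
      rw [List.cons_eq_cons]
      refine ⟨by simp, ?_⟩
      have hzero : (List.range tl.length).map ((fun j => if j = 0 then (1 : Int) else 0) ∘ Nat.succ)
          = List.replicate tl.length (0 : Int) := by
        rw [List.eq_replicate_iff]
        refine ⟨by simp, ?_⟩
        intro b hb
        simp only [List.mem_map, Function.comp] at hb
        obtain ⟨k, _, rfl⟩ := hb
        simp
      rw [hzero]
      simpa [pvSumIter] using pvSumIter_zero_right tl s tl.length le_rfl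
    | succ k =>
      simp only [List.map_cons, List.map_map, pvSumIter, List.zip_cons_cons, List.map_cons,
        List.take_succ_cons, List.getD_cons_succ, List.drop_succ_cons,
        List.cons_append, List.append_assoc]
      rw [List.cons_eq_cons]
      constructor
      · simp
      · have hsh : (List.range tl.length).map ((fun j => if j = k + 1 then (1 : Int) else 0) ∘ Nat.succ)
            = (List.range tl.length).map (fun j => if j = k then (1 : Int) else 0) := by
          apply List.map_congr_left
          intro j _
          simp [Function.comp]
        rw [hsh]
        have hk : k < tl.length := by simpa using hi
        simpa [pvSumIter, List.cons_append] using ih k hk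

theorem pvDfs_eq (d : Int) (p : List Int) (b : Int) (nz : Bool) (hb : 0 ≤ b) (hbd : b ≤ d) :
    pvDfs d p b nz =
      ((pvProduct (PySem.List.pyRange (-d) (d + 1) 1) p.length).filter
        (fun dp => (nz || decide (dp ≠ List.replicate p.length (0 : Int))) && decide (pvManhattan dp ≤ b))).map
        (fun dp => pvSumIter p dp 1) := by
  induction p generalizing b nz with
  | nil =>
    cases nz with
    | false => simp [pvDfs, pvProduct, pvManhattan]
    | true => simp [pvDfs, pvProduct, pvManhattan, pvSumIter, hb]
  | cons x rest ih =>
    simp only [pvDfs, List.length_cons, pvProduct]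
    rw [List.filter_flatMap, List.map_flatMap]
    apply List.flatMap_congr
    intro dx _
    rw [List.filter_map, List.map_map]
    by_cases hr : 0 ≤ b - |dx|
    · rw [if_pos hr, ih (b - |dx|) (nz || decide (dx ≠ 0)) hr
        (by have := abs_nonneg dx; omega), List.map_map]
      congr 1
      · funext dp
        simp only [Function.comp_apply, pvSumIter, List.zip_cons_cons, List.map_cons]
        rw [List.cons_eq_cons]
        exact ⟨by ring, rfl⟩
      · apply List.filter_congr
        intro dp _
        have h3 : pvManhattan (dx :: dp) = |dx| + pvManhattan dp := by
          simp [pvManhattan]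
        simp only [Function.comp_apply, List.replicate_succ]
        rw [h3]
        apply Bool.eq_iff_iff.mpr
        simp only [Bool.and_eq_true, Bool.or_eq_true, decide_eq_true_eq, ne_eq,
          List.cons_eq_cons, not_and]
        constructor
        · rintro ⟨h, h'⟩
          exact ⟨by tauto, by omega⟩
        · rintro ⟨h, h'⟩
          exact ⟨by tauto, by omega⟩
    · rw [if_neg hr]
      have hnil : (pvProduct (PySem.List.pyRange (-d) (d + 1) 1) rest.length).filter
          ((fun dp => (nz || decide (dp ≠ List.replicate (rest.length + 1) (0 : Int))) &&
            decide (pvManhattan dp ≤ b)) ∘ (fun t => dx :: t)) = [] := by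
        rw [List.filter_eq_nil_iff]
        intro t _
        have h0 := pvManhattan_nonneg t
        have h4 := abs_nonneg dx
        have h3 : pvManhattan (dx :: t) = |dx| + pvManhattan t := by simp [pvManhattan]
        simp only [Function.comp_apply, Bool.and_eq_true, decide_eq_true_eq, not_and, h3]
        intro _
        omega
      symm
      rw [List.map_eq_nil_iff]
      exact hnil

-- ===== VERDICT (by name: the statement is the Claim_ definition above) =====
theorem von_neumann_neighbors_spec : Claim_equal_von_neumann_neighbors := by
  intro p d _
  show von_neumann_neighbors p d = von_neumann_neighbors_alt p d
  unfold von_neumann_neighbors von_neumann_neighbors_alt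
  by_cases h1 : d = 1
  · rw [if_pos h1, if_pos h1]
    apply List.flatMap_congr
    intro i hi
    have hi' : i < p.length := List.mem_range.mp hi
    dsimp only
    rw [PySem.List.slice_to_natCast, PySem.List.pyGetD_natCast]
    have hcast : ((i : Int) + 1) = ((i + 1 : Nat) : Int) := by push_cast; ring
    rw [hcast, PySem.List.slice_from_natCast]
    simp only [List.map_cons, List.map_nil]
    rw [pvSumIter_unit p i 1 hi', pvSumIter_unit p i (-1) hi']
  · rw [if_neg h1, if_neg h1]
    by_cases hd : 0 ≤ d
    · rw [pvDfs_eq d p d false hd le_rfl]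
      dsimp only
      congr 1
      apply List.filter_congr
      intro dp _
      simp [Bool.decide_and]
    · cases p with
      | nil => simp [pvDfs, pvProduct, pvManhattan, pvSumIter]
      | cons x rest =>
        have hR : PySem.List.pyRange (-d) (d + 1) 1 = [] :=
          PySem.List.pyRange_one_eq_nil (by omega)
        simp [pvDfs, pvProduct, hR]
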